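-- pv_equiv track=rewrite | github.com/zxw254470434/PythonStudy | CSP/201912-1.py | is_jump
-- ===== SOURCE A (Python) =====
-- def is_jump(n):
--     if n % 7 == 0:
--         return True
--     while n > 0:
--         if n % 10 == 7:
--             return True
--         n = n // 10
--     return False
-- ===== SOURCE B (Python) =====
-- def is_jump(n):
--     return n % 7 == 0 or (n > 0 and '7' in str(n))
-- ===== Notes on version B (the rewrite author's own statement) =====
-- stated objective: idiomatic
-- what changed: Replaced the arithmetic %10 // 10 digit-extraction while-loop with a single boolean expression scanning the decimal string: n % 7 == 0 or (n > 0 and '7' in str(n)).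
import Mathlib
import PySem

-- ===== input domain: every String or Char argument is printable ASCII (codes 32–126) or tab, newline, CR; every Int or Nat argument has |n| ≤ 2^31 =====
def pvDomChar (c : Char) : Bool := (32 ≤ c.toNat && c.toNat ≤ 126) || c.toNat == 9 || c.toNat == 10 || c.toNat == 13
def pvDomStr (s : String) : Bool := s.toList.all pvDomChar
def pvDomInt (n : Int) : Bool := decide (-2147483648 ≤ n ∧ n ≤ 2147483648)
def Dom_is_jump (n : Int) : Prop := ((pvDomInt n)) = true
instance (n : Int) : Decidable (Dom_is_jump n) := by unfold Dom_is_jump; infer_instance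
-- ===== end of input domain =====

-- B replaces A's arithmetic digit-extraction loop with one boolean expression scanning the
-- decimal string; equivalence is proved for all Int inputs (both are total).

-- ===== PORT A =====
-- the 'while n > 0: if n % 10 == 7: return True; n = n // 10' loop of A
def isJumpLoopA (n : Int) : Bool :=
  if _h : 0 < n then
    if PySem.Int.mod n 10 == 7 then true
    else isJumpLoopA (PySem.Int.floordiv n 10)
  else false
termination_by n.toNat
decreasing_by
  rw [PySem.Int.floordiv_eq_ediv_of_pos (by norm_num)]
  omega

def is_jump (n : Int) : Bool :=
  if PySem.Int.mod n 7 == 0 then true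
  else isJumpLoopA n

-- ===== PORT B =====
-- return n % 7 == 0 or (n > 0 and '7' in str(n))
def is_jump_alt (n : Int) : Bool :=
  (PySem.Int.mod n 7 == 0) || (decide (0 < n) && PySem.Str.isIn "7" (PySem.Int.toStr n))

-- ===== PRECONDITION & SPEC =====
def Spec_is_jump (n : Int) (out : Bool) : Prop := out = is_jump_alt n
instance (n : Int) (out : Bool) : Decidable (Spec_is_jump n out) := by unfold Spec_is_jump; infer_instance

-- ===== CLAIM (what is proved, stated in full; the proofs are below) =====
def Claim_equal_is_jump : Prop := ∀ (n : Int), Dom_is_jump n → Spec_is_jump n (is_jump n)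

-- ===== LEMMAS AND PROOFS =====

-- 'some decimal digit of m is 7', in the shape of A's loop (proof-only helper)
def has7 (m : Nat) : Bool :=
  (m % 10 == 7) || (if m / 10 = 0 then false else has7 (m / 10))
termination_by m
decreasing_by omega

theorem digitChar_eq_seven_iff (d : Nat) (h : d < 10) : d.digitChar = '7' ↔ d = 7 := by
  interval_cases d <;> simp [Nat.digitChar]

theorem seven_eq_digitChar_iff (m : Nat) : '7' = (m % 10).digitChar ↔ m % 10 = 7 := by
  rw [eq_comm, digitChar_eq_seven_iff (m % 10) (by omega)]

theorem mem_toDigitsCore_iff :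
    ∀ (fuel m : Nat) (acc : List Char), m < fuel →
      ('7' ∈ Nat.toDigitsCore 10 fuel m acc ↔ (has7 m = true ∨ '7' ∈ acc)) := by
  intro fuel
  induction fuel with
  | zero => omega
  | succ f ih =>
    intro m acc hm
    rw [Nat.toDigitsCore]
    by_cases h0 : m / 10 = 0
    · rw [if_pos h0]
      conv_rhs => rw [has7, if_pos h0]
      rw [List.mem_cons, seven_eq_digitChar_iff]
      simp
    · rw [if_neg h0, ih _ _ (by omega)]
      conv_rhs => rw [has7, if_neg h0]
      rw [List.mem_cons, seven_eq_digitChar_iff]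
      simp only [Bool.or_eq_true, beq_iff_eq]
      tauto

theorem mem_toDigits_iff (m : Nat) : '7' ∈ Nat.toDigits 10 m ↔ has7 m = true := by
  rw [Nat.toDigits, mem_toDigitsCore_iff (m + 1) m [] (by omega)]
  simp

theorem loopA_eq (n : Int) : isJumpLoopA n = (decide (0 < n) && has7 n.toNat) := by
  fun_induction isJumpLoopA n with
  | case1 n hn htest =>
    have hmod : PySem.Int.mod n 10 = n % 10 := PySem.Int.mod_eq_emod_of_pos (by norm_num)
    have h7 : n.toNat % 10 = 7 := by
      have := beq_iff_eq.mp htest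
      omega
    rw [has7]
    simp [hn, h7]
  | case2 n hn htest ih =>
    have hmod : PySem.Int.mod n 10 = n % 10 := PySem.Int.mod_eq_emod_of_pos (by norm_num)
    have hdiv : PySem.Int.floordiv n 10 = n / 10 := PySem.Int.floordiv_eq_ediv_of_pos (by norm_num)
    have h7 : ¬ n.toNat % 10 = 7 := by
      rw [hmod] at htest
      simp only [beq_iff_eq] at htest
      omega
    have hb : (n.toNat % 10 == 7) = false := by simp [h7]
    rw [ih, hdiv]
    have htn : (n / 10).toNat = n.toNat / 10 := by omega
    rw [htn]
    conv_rhs => rw [has7]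
    rw [hb, Bool.false_or]
    by_cases hq : n.toNat / 10 = 0
    · have hnd : ¬ (0 < n / 10) := by omega
      rw [if_pos hq]
      simp [hnd]
    · have hnd : 0 < n / 10 := by omega
      rw [if_neg hq]
      simp [hnd, hn]
  | case3 n hn =>
    simp [hn]

theorem isIn_seven_iff (n : Int) (hn : 0 < n) :
    PySem.Str.isIn "7" (PySem.Int.toStr n) = has7 n.toNat := by
  have h1 : PySem.Str.isIn "7" (PySem.Int.toStr n)
      = PySem.Chars.isIn "7".toList (PySem.Int.toStr n).toList := PySem.Str.isIn_eq ..
  rw [h1, PySem.Int.toList_toStr]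
  have h2 : PySem.Int.toChars n = Nat.toDigits 10 n.toNat := by
    rw [PySem.Int.toChars]
    rw [if_neg (by omega)]
  rw [h2]
  by_cases h : has7 n.toNat = true
  · rw [h]
    rw [PySem.Chars.isIn_iff_infix]
    show ['7'] <:+: _
    rw [List.singleton_infix_iff]
    exact (mem_toDigits_iff _).mpr h
  · simp only [Bool.not_eq_true] at h
    rw [h]
    rw [PySem.Chars.isIn_eq_false_iff]
    show ¬ ['7'] <:+: _
    rw [List.singleton_infix_iff, mem_toDigits_iff]
    simp [h]

-- ===== VERDICT (by name: the statement is the Claim_ definition above) =====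
theorem is_jump_spec : Claim_equal_is_jump := by
  intro n _
  unfold Spec_is_jump is_jump is_jump_alt
  by_cases h7 : (PySem.Int.mod n 7 == 0) = true
  · rw [if_pos h7, h7, Bool.true_or]
  · rw [if_neg h7]
    have hf : (PySem.Int.mod n 7 == 0) = false := by
      simpa using h7
    rw [hf, Bool.false_or, loopA_eq]
    by_cases hn : 0 < n
    · rw [isIn_seven_iff n hn]
    · simp [hn]
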